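-- pv_equiv track=rewrite | github.com/lkpAgent/hr-agent | backend/scripts/scores_allocate.py | allocate_question_scores
-- ===== SOURCE A (Python) =====
-- from typing import Dict,List
--
-- def allocate_question_scores(total_score: int, counts: Dict[str, int]) -> Dict[str, List[int]]:
--     # 仅支持三种题型：单选题、多选题、简答题
--     weights = {
--         "single_choice": 2,
--         "multiple_choice": 3,
--         "short_answer": 5,
--     }
--
--     # 初始化每题分值列表
--     scores: Dict[str, List[int]] = {
--         t: [0] * max(0, counts.get(t, 0)) for t in ["single_choice", "multiple_choice", "short_answer"]
--     }
--
--     # 计算加权题量总和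
--     weighted_total = 0
--     for t, w in weights.items():
--         weighted_total += counts.get(t, 0) * w
--
--     if weighted_total <= 0 or total_score <= 0:
--         return scores
--
--     # 基础单位分和剩余分
--     base_unit = total_score // weighted_total
--     remainder = total_score % weighted_total
--
--     # 先按权重为每题分配基础分值
--     for t, w in weights.items():
--         c = counts.get(t, 0)
--         if c > 0:
--             base_per_question = w * base_unit
--             scores[t] = [base_per_question] * c
--
--     # 将剩余分数依次分配给“最后几题”：先简答题末尾，后多选题末尾，再单选题末尾
--     distribution_order = ["short_answer", "multiple_choice", "single_choice"]
--     while remainder > 0: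
--         allocated_this_round = False
--         for t in distribution_order:
--             arr = scores.get(t, [])
--             # 从末尾开始为每题加 1 分，直到该类型题目遍历完或剩余分数为 0
--             for i in range(len(arr) - 1, -1, -1):
--                 if remainder <= 0:
--                     break
--                 arr[i] += 1
--                 remainder -= 1
--                 allocated_this_round = True
--         if not allocated_this_round:
--             # 没有任何题目可分配（例如题量为 0），避免死循环
--             break
--
--     return scores
-- ===== SOURCE B (Python) =====
-- from typing import Dict, List
--
-- def allocate_question_scores(total_score: int, counts: Dict[str, int]) -> Dict[str, List[int]]:
--     weights = {
--         "single_choice": 2,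
--         "multiple_choice": 3,
--         "short_answer": 5,
--     }
--     scores: Dict[str, List[int]] = {
--         t: [0] * max(0, counts.get(t, 0)) for t in weights
--     }
--     weighted_total = sum(counts.get(t, 0) * w for t, w in weights.items())
--     if weighted_total <= 0 or total_score <= 0:
--         return scores
--     base_unit, remainder = divmod(total_score, weighted_total)
--     for t, w in weights.items():
--         c = counts.get(t, 0)
--         if c > 0:
--             scores[t] = [w * base_unit] * c
--     # Closed-form remainder distribution: rank the questions in the order
--     # short_answer (last question first), then multiple_choice, then single_choice;
--     # rank k gets an extra remainder//N, plus 1 if k < remainder%N.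
--     n = sum(len(arr) for arr in scores.values())
--     if n > 0 and remainder > 0:
--         q, r = divmod(remainder, n)
--         rank = 0
--         for t in ["short_answer", "multiple_choice", "single_choice"]:
--             arr = scores[t]
--             for i in range(len(arr) - 1, -1, -1):
--                 arr[i] += q + (1 if rank < r else 0)
--                 rank += 1
--     return scores
-- ===== Notes on version B (the rewrite author's own statement) =====
-- stated objective: simpler
-- what changed: A dribbles the remainder out with an up-to-5-round while-loop that repeatedly walks all three score lists from the end; B ranks the questions once (short_answer reversed, then multiple_choice reversed, then single_choice reversed) and gives rank k a closed-form extra of remainder//N plus 1 if k < remainder%N, in a single pass.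
import Mathlib
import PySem

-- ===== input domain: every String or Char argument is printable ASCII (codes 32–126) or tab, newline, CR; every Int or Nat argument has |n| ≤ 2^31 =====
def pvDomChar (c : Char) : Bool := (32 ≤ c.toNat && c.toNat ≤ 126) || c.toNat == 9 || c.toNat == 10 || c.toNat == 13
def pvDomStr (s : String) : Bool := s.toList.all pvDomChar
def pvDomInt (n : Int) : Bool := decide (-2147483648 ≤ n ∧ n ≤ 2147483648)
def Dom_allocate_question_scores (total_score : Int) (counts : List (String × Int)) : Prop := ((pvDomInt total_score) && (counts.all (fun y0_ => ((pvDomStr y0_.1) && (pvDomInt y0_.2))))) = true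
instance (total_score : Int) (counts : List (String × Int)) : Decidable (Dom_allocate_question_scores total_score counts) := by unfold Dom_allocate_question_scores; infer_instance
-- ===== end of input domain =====

-- B replaces A's multi-round while-loop remainder distribution with a single
-- closed-form pass (each rank gets remainder//N, the first remainder%N ranks +1);
-- objective: simpler.

-- ===== PORT A =====
-- counts.get(t, 0) on the dict argument (first-match association list)
def pvGetCount (counts : List (String × Int)) (t : String) : Int :=
  PySem.Dict.getD (PySem.Dict.mk counts) t 0

-- inner 'for i in range(len(arr)-1, -1, -1): if remainder <= 0: break; arr[i] += 1; remainder -= 1'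
-- (structural recursion: later indices are processed first, exactly Python's end-to-front order)
def addEnd : List Int → Int → List Int × Int
  | [], rem => ([], rem)
  | x :: xs, rem =>
    let p := addEnd xs rem
    if 0 < p.2 then ((x + 1) :: p.1, p.2 - 1) else (x :: p.1, p.2)

-- A's 'while remainder > 0' loop over distribution_order = [short_answer, multiple_choice, single_choice];
-- allocated_this_round ↔ the remainder strictly decreased
def whileA (rem : Int) (a m s : List Int) : List Int × List Int × List Int :=
  if _hpos : 0 < rem then
    if _halloc : (addEnd s (addEnd m (addEnd a rem).2).2).2 < rem then
      whileA (addEnd s (addEnd m (addEnd a rem).2).2).2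
        (addEnd a rem).1 (addEnd m (addEnd a rem).2).1 (addEnd s (addEnd m (addEnd a rem).2).2).1
    else ((addEnd a rem).1, (addEnd m (addEnd a rem).2).1, (addEnd s (addEnd m (addEnd a rem).2).2).1)
  else (a, m, s)
termination_by rem.toNat
decreasing_by omega

def allocate_question_scores (total_score : Int) (counts : List (String × Int)) : List (String × List Int) :=
  let cS := pvGetCount counts "single_choice"
  let cM := pvGetCount counts "multiple_choice"
  let cA := pvGetCount counts "short_answer"
  let weighted_total := cS * 2 + cM * 3 + cA * 5
  if weighted_total ≤ 0 ∨ total_score ≤ 0 then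
    [("single_choice", List.replicate (max 0 cS).toNat (0 : Int)),
     ("multiple_choice", List.replicate (max 0 cM).toNat (0 : Int)),
     ("short_answer", List.replicate (max 0 cA).toNat (0 : Int))]
  else
    let base_unit := PySem.Int.floordiv total_score weighted_total
    let rem := PySem.Int.mod total_score weighted_total
    let sS := if 0 < cS then List.replicate cS.toNat (2 * base_unit) else List.replicate (max 0 cS).toNat (0 : Int)
    let sM := if 0 < cM then List.replicate cM.toNat (3 * base_unit) else List.replicate (max 0 cM).toNat (0 : Int)
    let sA := if 0 < cA then List.replicate cA.toNat (5 * base_unit) else List.replicate (max 0 cA).toNat (0 : Int)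
    let res := whileA rem sA sM sS
    [("single_choice", res.2.2), ("multiple_choice", res.2.1), ("short_answer", res.1)]

-- ===== PORT B =====
-- B's closed-form pass: 'for i in range(len(arr)-1,-1,-1): arr[i] += q + (1 if rank < r else 0); rank += 1'
-- (returns the updated list and the rank counter after the list)
def addClosed : List Int → Int → Int → Int → List Int × Int
  | [], _, _, rank => ([], rank)
  | x :: xs, q, r, rank =>
    let p := addClosed xs q r rank
    ((x + q + (if p.2 < r then 1 else 0)) :: p.1, p.2 + 1)

def allocate_question_scores_alt (total_score : Int) (counts : List (String × Int)) : List (String × List Int) :=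
  let cS := pvGetCount counts "single_choice"
  let cM := pvGetCount counts "multiple_choice"
  let cA := pvGetCount counts "short_answer"
  let weighted_total := cS * 2 + cM * 3 + cA * 5
  if weighted_total ≤ 0 ∨ total_score ≤ 0 then
    [("single_choice", List.replicate (max 0 cS).toNat (0 : Int)),
     ("multiple_choice", List.replicate (max 0 cM).toNat (0 : Int)),
     ("short_answer", List.replicate (max 0 cA).toNat (0 : Int))]
  else
    let base_unit := PySem.Int.floordiv total_score weighted_total
    let remainder := PySem.Int.mod total_score weighted_total
    let sS := if 0 < cS then List.replicate cS.toNat (2 * base_unit) else List.replicate (max 0 cS).toNat (0 : Int)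
    let sM := if 0 < cM then List.replicate cM.toNat (3 * base_unit) else List.replicate (max 0 cM).toNat (0 : Int)
    let sA := if 0 < cA then List.replicate cA.toNat (5 * base_unit) else List.replicate (max 0 cA).toNat (0 : Int)
    let n : Int := (sS.length : Int) + (sM.length : Int) + (sA.length : Int)
    if 0 < n ∧ 0 < remainder then
      let q := PySem.Int.floordiv remainder n
      let r := PySem.Int.mod remainder n
      let pA := addClosed sA q r 0
      let pM := addClosed sM q r pA.2
      let pS := addClosed sS q r pM.2
      [("single_choice", pS.1), ("multiple_choice", pM.1), ("short_answer", pA.1)]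
    else
      [("single_choice", sS), ("multiple_choice", sM), ("short_answer", sA)]

-- ===== PRECONDITION & SPEC =====
def Spec_allocate_question_scores (total_score : Int) (counts : List (String × Int)) (out : List (String × List Int)) : Prop := out = allocate_question_scores_alt total_score counts
instance (total_score : Int) (counts : List (String × Int)) (out : List (String × List Int)) : Decidable (Spec_allocate_question_scores total_score counts out) := by unfold Spec_allocate_question_scores; infer_instance

-- ===== CLAIM (what is proved, stated in full; the proofs are below) =====
def Claim_equal_allocate_question_scores : Prop := ∀ (total_score : Int) (counts : List (String × Int)), Dom_allocate_question_scores total_score counts → Spec_allocate_question_scores total_score counts (allocate_question_scores total_score counts)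

-- ===== LEMMAS AND PROOFS =====

-- 'add one to every element whose rank-from-the-end is < thr'
def bump (thr : Int) : List Int → List Int
  | [] => []
  | x :: xs => (if (xs.length : Int) < thr then x + 1 else x) :: bump thr xs

-- 'add q, plus 1 if off + rank-from-the-end < r, to every element'
def bumpQ (q r off : Int) : List Int → List Int
  | [] => []
  | x :: xs => (x + q + if off + (xs.length : Int) < r then 1 else 0) :: bumpQ q r off xs

theorem bump_length (thr : Int) (l : List Int) : (bump thr l).length = l.length := by
  induction l with
  | nil => rfl
  | cons x xs ih => simp [bump, ih]

theorem addEnd_eq (arr : List Int) (rem : Int) (h : 0 ≤ rem) :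
    addEnd arr rem = (bump rem arr, rem - min rem arr.length) := by
  induction arr with
  | nil => simp [addEnd, bump]; omega
  | cons x xs ih =>
    simp only [addEnd, ih, bump, List.length_cons]
    have hx : 0 < rem - min rem (xs.length : Int) ↔ (xs.length : Int) < rem := by omega
    by_cases hc : (xs.length : Int) < rem
    · rw [if_pos (hx.2 hc), if_pos hc, Prod.mk.injEq]
      exact And.intro rfl (by push_cast; omega)
    · rw [if_neg (fun hp => hc (hx.1 hp)), if_neg hc, Prod.mk.injEq]
      exact And.intro rfl (by push_cast; omega)

theorem addClosed_eq (arr : List Int) (q r rank : Int) :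
    addClosed arr q r rank = (bumpQ q r rank arr, rank + arr.length) := by
  induction arr with
  | nil => simp [addClosed, bumpQ]
  | cons x xs ih =>
    simp only [addClosed, ih, bumpQ, List.length_cons, Prod.mk.injEq]
    exact And.intro (by trivial) (by push_cast; ring)

-- pointwise composition of a bump and a bumpQ into one bumpQ
theorem bumpQ_bump (q' r' q r off t : Int) (X : List Int)
    (h : ∀ j : Nat, j < X.length →
      (if (j : Int) < t then (1:Int) else 0) + q' + (if off + j < r' then 1 else 0)
        = q + (if off + (j : Int) < r then 1 else 0)) :
    bumpQ q' r' off (bump t X) = bumpQ q r off X := by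
  induction X with
  | nil => rfl
  | cons x xs ih =>
    simp only [bump, bumpQ, bump_length, List.cons.injEq]
    constructor
    · have := h xs.length (by simp)
      split_ifs at this ⊢ <;> omega
    · exact ih (fun j hj => h j (by simp; omega))

theorem bumpQ_zero (off : Int) (hoff : 0 ≤ off) (l : List Int) : bumpQ 0 0 off l = l := by
  induction l with
  | nil => rfl
  | cons x xs ih =>
    simp only [bumpQ, ih]
    rw [if_neg (by omega : ¬ off + (xs.length : Int) < 0)]
    ring_nf

-- the arithmetic heart: one round of +1 to every rank plus the closed form for the
-- reduced remainder equals the closed form for the full remainder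
theorem key_arith (N k rem : Int) (hN : 0 < N) (hrem : 0 < rem) (hk : 0 ≤ k) (hkN : k < N) :
    (if k < rem then (1:Int) else 0) + (rem - min rem N) / N + (if k < (rem - min rem N) % N then 1 else 0)
      = rem / N + (if k < rem % N then 1 else 0) := by
  rcases le_or_gt rem N with hle | hgt
  · -- at most one full round: reduced remainder is 0
    have hmin : min rem N = rem := by omega
    rw [hmin]
    simp only [sub_self, Int.zero_ediv, Int.zero_emod]
    rcases eq_or_lt_of_le hle with heq | hlt
    · subst heq
      rw [Int.ediv_self (by omega), Int.emod_self]
      split_ifs <;> omega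
    · rw [Int.ediv_eq_zero_of_lt (by omega) hlt, Int.emod_eq_of_lt (by omega) hlt]
      split_ifs <;> omega
  · have hmin : min rem N = N := by omega
    rw [hmin]
    have hd : (rem - N) / N = rem / N - 1 := by
      have := Int.add_mul_ediv_right rem (-1) (by omega : N ≠ 0)
      simpa [sub_eq_add_neg, neg_mul] using this
    have hm : (rem - N) % N = rem % N := by
      exact Int.sub_emod_right rem N
    rw [hd, hm, if_pos (by omega : k < rem)]
    ring

-- the main loop lemma: A's while-loop equals B's closed form (N = total number of questions)
theorem whileA_eq (n : Nat) : ∀ (rem : Int) (a m s : List Int), rem.toNat ≤ n → 0 ≤ rem →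
    0 < (a.length : Int) + m.length + s.length →
    whileA rem a m s =
      (bumpQ (rem / ((a.length : Int) + m.length + s.length)) (rem % ((a.length : Int) + m.length + s.length)) 0 a,
       bumpQ (rem / ((a.length : Int) + m.length + s.length)) (rem % ((a.length : Int) + m.length + s.length)) (a.length) m,
       bumpQ (rem / ((a.length : Int) + m.length + s.length)) (rem % ((a.length : Int) + m.length + s.length)) ((a.length : Int) + m.length) s) := by
  induction n with
  | zero =>
    intro rem a m s hle h0 hN
    have hz : rem = 0 := by omega
    subst hz
    rw [whileA, dif_neg (by omega : ¬ (0:Int) < 0)]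
    rw [Int.zero_ediv, Int.zero_emod, bumpQ_zero 0 le_rfl, bumpQ_zero _ (by omega),
        bumpQ_zero _ (by omega)]
  | succ k ih =>
    intro rem a m s hle h0 hN
    by_cases hpos : 0 < rem
    · have e1 := addEnd_eq a rem h0
      have h1 : 0 ≤ rem - min rem (a.length : Int) := by omega
      have e2 := addEnd_eq m _ h1
      have h2 : 0 ≤ rem - min rem (a.length : Int) - min (rem - min rem (a.length : Int)) (m.length : Int) := by omega
      have e3 := addEnd_eq s _ h2
      have hlt : rem - min rem (a.length : Int) - min (rem - min rem (a.length : Int)) (m.length : Int)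
          - min (rem - min rem (a.length : Int) - min (rem - min rem (a.length : Int)) (m.length : Int)) (s.length : Int) < rem := by omega
      rw [whileA, dif_pos hpos]
      simp only [e1, e2, e3]
      rw [dif_pos hlt]
      rw [ih _ _ _ _ (by omega) (by omega) (by simpa [bump_length] using hN)]
      simp only [bump_length]
      have hr3N : rem - min rem (a.length : Int) - min (rem - min rem (a.length : Int)) (m.length : Int)
          - min (rem - min rem (a.length : Int) - min (rem - min rem (a.length : Int)) (m.length : Int)) (s.length : Int)
          = rem - min rem ((a.length : Int) + m.length + s.length) := by omega
      rw [hr3N, Prod.mk.injEq, Prod.mk.injEq]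
      refine ⟨?_, ?_, ?_⟩
      · apply bumpQ_bump
        intro j hj
        have hiff : ((j : Int) < rem) ↔ ((0 : Int) + j < rem) := by omega
        rw [if_congr hiff rfl rfl]
        exact key_arith _ (0 + (j : Int)) rem hN hpos (by omega) (by omega)
      · apply bumpQ_bump
        intro j hj
        have hiff : ((j : Int) < rem - min rem (a.length : Int)) ↔ ((a.length : Int) + j < rem) := by omega
        rw [if_congr hiff rfl rfl]
        exact key_arith _ ((a.length : Int) + (j : Int)) rem hN hpos (by omega) (by omega)
      · apply bumpQ_bump
        intro j hj
        have hiff : ((j : Int) < rem - min rem (a.length : Int) - min (rem - min rem (a.length : Int)) (m.length : Int))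
            ↔ ((a.length : Int) + m.length + j < rem) := by omega
        rw [if_congr hiff rfl rfl]
        exact key_arith _ ((a.length : Int) + (m.length : Int) + (j : Int)) rem hN hpos (by omega) (by omega)
    · have hz : rem = 0 := by omega
      subst hz
      rw [whileA, dif_neg (by omega : ¬ (0:Int) < 0)]
      rw [Int.zero_ediv, Int.zero_emod, bumpQ_zero 0 le_rfl, bumpQ_zero _ (by omega),
          bumpQ_zero _ (by omega)]

theorem whileA_nil (rem : Int) : whileA rem [] [] [] = ([], [], []) := by
  rw [whileA]
  by_cases hp : 0 < rem
  · rw [dif_pos hp, dif_neg (by simp [addEnd])]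
    simp [addEnd]
  · rw [dif_neg hp]

-- B's closed-form tail equals A's while-loop tail, for any base lists and 0 ≤ remainder
theorem dist_eq (remainder : Int) (hrem : 0 ≤ remainder) (sS sM sA : List Int) :
    (let n : Int := (sS.length : Int) + (sM.length : Int) + (sA.length : Int)
     if 0 < n ∧ 0 < remainder then
       let q := PySem.Int.floordiv remainder n
       let r := PySem.Int.mod remainder n
       let pA := addClosed sA q r 0
       let pM := addClosed sM q r pA.2
       let pS := addClosed sS q r pM.2
       [("single_choice", pS.1), ("multiple_choice", pM.1), ("short_answer", pA.1)]
     else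
       [("single_choice", sS), ("multiple_choice", sM), ("short_answer", sA)])
    = (let res := whileA remainder sA sM sS
       [("single_choice", res.2.2), ("multiple_choice", res.2.1), ("short_answer", res.1)]) := by
  dsimp only
  by_cases h : 0 < (sS.length : Int) + (sM.length : Int) + (sA.length : Int) ∧ 0 < remainder
  · rw [if_pos h]
    obtain ⟨hn, hr⟩ := h
    rw [PySem.Int.floordiv_eq_ediv_of_pos hn, PySem.Int.mod_eq_emod_of_pos hn]
    rw [addClosed_eq, addClosed_eq, addClosed_eq]
    dsimp only
    have hN' : 0 < (sA.length : Int) + (sM.length : Int) + (sS.length : Int) := by omega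
    rw [whileA_eq remainder.toNat remainder sA sM sS le_rfl hrem hN']
    dsimp only
    have e : (sS.length : Int) + (sM.length : Int) + (sA.length : Int)
        = (sA.length : Int) + (sM.length : Int) + (sS.length : Int) := by ring
    rw [e]
    simp only [zero_add]
  · rw [if_neg h]
    rcases not_and_or.1 h with hn | hr
    · have hS : sS = [] := List.length_eq_zero_iff.mp (by omega)
      have hM : sM = [] := List.length_eq_zero_iff.mp (by omega)
      have hA : sA = [] := List.length_eq_zero_iff.mp (by omega)
      subst hS; subst hM; subst hA
      rw [whileA_nil]
    · have hz : remainder = 0 := by omega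
      subst hz
      rw [whileA, dif_neg (by omega : ¬ (0:Int) < 0)]

-- ===== VERDICT (by name: the statement is the Claim_ definition above) =====
theorem allocate_question_scores_spec : Claim_equal_allocate_question_scores := by
  intro total_score counts _
  unfold Spec_allocate_question_scores allocate_question_scores allocate_question_scores_alt
  dsimp only
  by_cases hc : pvGetCount counts "single_choice" * 2 + pvGetCount counts "multiple_choice" * 3 +
      pvGetCount counts "short_answer" * 5 ≤ 0 ∨ total_score ≤ 0
  · rw [if_pos hc, if_pos hc]
  · rw [if_neg hc, if_neg hc]
    have hwt : 0 < pvGetCount counts "single_choice" * 2 + pvGetCount counts "multiple_choice" * 3 +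
        pvGetCount counts "short_answer" * 5 := by
      rcases not_or.1 hc with ⟨h1, h2⟩; omega
    exact (dist_eq _ (PySem.Int.mod_nonneg _ hwt) _ _ _).symm
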